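-- pv_equiv track=rewrite | github.com/FanchenBao/project_euler | p72/p72_odd only totient.py | oddTotientSieve
-- ===== SOURCE A (Python) =====
-- def oddTotientSieve(upperLimit):
--     ''' Using the sieving method to calculate totients for all odd numbers up to upperLimit '''
--     oddTotient = [i - 1 for i in range(upperLimit + 1)]
--     oddTotient[1] = 1 # for the sake of this calculation, phi(1) is defined as 1
--     i = 3
--     while 3 * i <= upperLimit: # note the difference in the boundary condition from an Erathosthenese sieve.
--                                 # We have to check for all multiples of i starting from 3 to not miss i as
--                                 # prime factor for small odd composite numbers
--         if oddTotient[i] == i - 1: # i is prime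
--             j = 3 # start from 3 each time to not miss i as prime factors for small odd composite numbers
--             while j * i <= upperLimit:
--                 if oddTotient[j * i] == j * i - 1: # this odd composite number is visited the first time, restore its initial value
--                     oddTotient[j * i] = j * i
--                 oddTotient[j * i] = oddTotient[j * i] * (i - 1) // i # i is one prime factor of current number j * i
--                 j += 2
--         i += 2
--
--     return oddTotient
-- ===== SOURCE B (Python) =====
-- def oddTotientSieve(upperLimit):
--     ''' Totients for all odd numbers up to upperLimit, computed per number by trial division '''
--     def phi(n):
--         m, t, d = n, 1, 3
--         while d * d <= m:
--             if m % d == 0: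
--                 m //= d
--                 t *= d - 1
--                 while m % d == 0:
--                     m //= d
--                     t *= d
--             d += 2
--         if m > 1:
--             t *= m - 1
--         return t
--     return [phi(i) if i % 2 else i - 1 for i in range(upperLimit + 1)]
-- ===== Notes on version B (the rewrite author's own statement) =====
-- stated objective: alternative
-- what changed: Replaces the in-place prime sieve (which rescales every odd multiple of each detected prime by (p-1)/p with a first-visit restore hack) by a direct per-number trial-division computation of Euler's totient for each odd index; even indices are i-1 by construction.
import Mathlib
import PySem

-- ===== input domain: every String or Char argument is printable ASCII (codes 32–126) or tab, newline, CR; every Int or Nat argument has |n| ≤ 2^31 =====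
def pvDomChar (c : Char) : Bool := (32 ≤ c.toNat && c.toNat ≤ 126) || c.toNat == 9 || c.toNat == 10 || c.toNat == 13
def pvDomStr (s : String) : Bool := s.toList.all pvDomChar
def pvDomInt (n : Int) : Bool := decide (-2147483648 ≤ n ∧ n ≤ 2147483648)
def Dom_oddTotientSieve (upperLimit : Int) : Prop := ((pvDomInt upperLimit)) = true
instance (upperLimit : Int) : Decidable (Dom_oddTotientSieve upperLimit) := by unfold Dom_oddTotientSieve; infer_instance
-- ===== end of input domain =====

-- B replaces A's in-place totient sieve by a per-number trial-division totient (different algorithm, similar size; not faster).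


-- ===== PORT A =====
-- inner `while j * i <= upperLimit` loop of A (j over odd cofactors of the prime i)
def pvInnerA (limit i : Int) (hi : 0 < i) (j : Int) (arr : List Int) : List Int :=
  if h : j * i ≤ limit then
    let arr1 := if PySem.List.pyGetD arr (j * i) 0 = j * i - 1
                then PySem.List.pySetD arr (j * i) (j * i) else arr
    let arr2 := PySem.List.pySetD arr1 (j * i)
                  (PySem.Int.floordiv (PySem.List.pyGetD arr1 (j * i) 0 * (i - 1)) i)
    pvInnerA limit i hi (j + 2) arr2
  else arr
termination_by (limit + 1 - j * i).toNat
decreasing_by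
  have e : (j + 2) * i = j * i + 2 * i := by ring
  omega

-- outer `while 3 * i <= upperLimit` loop of A
def pvOuterA (limit i : Int) (hi : 0 < i) (arr : List Int) : List Int :=
  if h : 3 * i ≤ limit then
    let arr' := if PySem.List.pyGetD arr i 0 = i - 1 then pvInnerA limit i hi 3 arr else arr
    pvOuterA limit (i + 2) (by omega) arr'
  else arr
termination_by (limit + 1 - 3 * i).toNat
decreasing_by
  have e : 3 * (i + 2) = 3 * i + 6 := by ring
  omega

def oddTotientSieve (upperLimit : Int) : List Int :=
  let arr0 := (PySem.List.pyRange 0 (upperLimit + 1) 1).map (fun i => i - 1)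
  let arr1 := PySem.List.pySetD arr0 1 1
  pvOuterA upperLimit 3 (by norm_num) arr1

-- ===== PORT B =====
-- Source B's innermost `while m % d == 0` loop (the 0 < m / 2 ≤ d conjuncts only totalize it; they hold at every reachable call)
def pvStrip (m d t : Nat) : Nat × Nat :=
  if h : m % d = 0 ∧ 0 < m ∧ 2 ≤ d then pvStrip (m / d) d (t * d) else (m, t)
termination_by m
decreasing_by exact Nat.div_lt_self h.2.1 (by omega)

-- needed by pvPhiLoop's termination proof
theorem pvStrip_fst_le (m d t : Nat) : (pvStrip m d t).1 ≤ m := by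
  induction m using Nat.strong_induction_on generalizing t with
  | _ m ih =>
    rw [pvStrip]
    split
    · rename_i h
      exact le_trans (ih _ (Nat.div_lt_self h.2.1 (by omega)) _) (Nat.div_le_self _ _)
    · exact le_rfl

-- Source B's `while d * d <= m` loop of phi
def pvPhiLoop (m d t : Nat) : Nat :=
  if h : d * d ≤ m then
    if m % d = 0 then
      pvPhiLoop (pvStrip (m / d) d (t * (d - 1))).1 (d + 2) (pvStrip (m / d) d (t * (d - 1))).2
    else
      pvPhiLoop m (d + 2) t
  else
    if 1 < m then t * (m - 1) else t
termination_by m + 1 - d * d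
decreasing_by
  · have h1 := pvStrip_fst_le (m / d) d (t * (d - 1))
    have h2 : m / d ≤ m := Nat.div_le_self _ _
    have e : (d + 2) * (d + 2) = d * d + 4 * d + 4 := by ring
    omega
  · have e : (d + 2) * (d + 2) = d * d + 4 * d + 4 := by ring
    omega

def oddTotientSieve_alt (upperLimit : Int) : List Int :=
  (PySem.List.pyRange 0 (upperLimit + 1) 1).map
    (fun i => if PySem.Int.mod i 2 ≠ 0 then (pvPhiLoop i.toNat 3 1 : Int) else i - 1)

-- ===== PRECONDITION & SPEC =====
-- A raises IndexError for upperLimit < 1 (`oddTotient[1] = 1` on a list with no index 1); nothing else is excluded.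
def Pre_oddTotientSieve (upperLimit : Int) : Prop := 1 ≤ upperLimit
instance (upperLimit : Int) : Decidable (Pre_oddTotientSieve upperLimit) := by
  unfold Pre_oddTotientSieve; infer_instance
def pvWitness_oddTotientSieve : Int := 15

def Spec_oddTotientSieve (upperLimit : Int) (out : List Int) : Prop := out = oddTotientSieve_alt upperLimit
instance (upperLimit : Int) (out : List Int) : Decidable (Spec_oddTotientSieve upperLimit out) := by
  unfold Spec_oddTotientSieve; infer_instance

-- ===== CLAIM (what is proved, stated in full; the proofs are below) =====
def Claim_equal_oddTotientSieve : Prop := ∀ (upperLimit : Int), Dom_oddTotientSieve upperLimit → Pre_oddTotientSieve upperLimit → Spec_oddTotientSieve upperLimit (oddTotientSieve upperLimit)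

-- ===== LEMMAS AND PROOFS =====

-- The set of primes the sieve has already folded into index n once the outer counter has passed b:
-- p is a prime factor of n with cofactor ≥ 3 (A's inner loop starts at j = 3) that the outer loop reached (p < b).
def pvF (n b : Nat) : Finset Nat := n.primeFactors.filter (fun p => 3 * p ≤ n ∧ p < b)

-- value of cell n of A's array once the outer counter has passed b
def pvVal (n b : Nat) : Int :=
  if n % 2 = 0 then (n : Int) - 1
  else if n = 1 then 1
  else if pvF n b = ∅ then (n : Int) - 1
  else ((n / ∏ p ∈ pvF n b, p) * ∏ p ∈ pvF n b, (p - 1) : Nat)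

def pvL (limit : Int) : Nat := (limit + 1).toNat

def pvTarget (n : Nat) : Int := if n % 2 = 1 then (n.totient : Int) else (n : Int) - 1

-- ---- generic facts ----
theorem pvSet_map_range {f : Nat → Int} {L k : Nat} (hk : k < L) (v : Int) :
    ((List.range L).map f).set k v = (List.range L).map (fun n => if n = k then v else f n) := by
  apply List.ext_getElem
  · simp
  · intro n h1 h2
    rw [List.getElem_set]
    simp only [List.getElem_map, List.getElem_range]
    by_cases h : n = k
    · subst h; simp
    · simp [h, Ne.symm h]

theorem pvOdd_factor {n p : Nat} (hn : n % 2 = 1) (hpp : p.Prime) (hpd : p ∣ n) : p % 2 = 1 := by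
  by_contra h
  have h2 : 2 ∣ p := Nat.dvd_of_mod_eq_zero (by omega)
  have h3 : 2 ∣ n := h2.trans hpd
  omega

-- ---- pvF / pvVal structure ----
theorem pvF_mem {n b p : Nat} (h : p ∈ pvF n b) : p.Prime ∧ p ∣ n ∧ 3 * p ≤ n ∧ p < b := by
  rcases Finset.mem_filter.mp h with ⟨h1, h2, h3⟩
  rcases Nat.mem_primeFactors.mp h1 with ⟨hp, hd, _⟩
  exact ⟨hp, hd, h2, h3⟩

theorem pvF_succ_not {n b : Nat} (h : ¬ (b.Prime ∧ b ∣ n ∧ 3 * b ≤ n)) :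
    pvF n (b + 1) = pvF n b := by
  unfold pvF
  apply Finset.filter_congr
  intro p hp
  rcases Nat.mem_primeFactors.mp hp with ⟨hpp, hpd, _⟩
  constructor
  · rintro ⟨h3, hlt⟩
    refine ⟨h3, ?_⟩
    rcases Nat.lt_succ_iff_lt_or_eq.mp hlt with h' | h'
    · exact h'
    · exact absurd ⟨h' ▸ hpp, h' ▸ hpd, h' ▸ h3⟩ h
  · rintro ⟨h3, hlt⟩; exact ⟨h3, by omega⟩

theorem pvF_succ_mem {n b : Nat} (hn : 0 < n) (hb : b.Prime) (hd : b ∣ n) (h3 : 3 * b ≤ n) :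
    pvF n (b + 1) = insert b (pvF n b) ∧ b ∉ pvF n b := by
  constructor
  · unfold pvF
    ext p
    simp only [Finset.mem_filter, Finset.mem_insert, Nat.mem_primeFactors]
    constructor
    · rintro ⟨⟨hpp, hpd, hn0⟩, hp3, hlt⟩
      rcases Nat.lt_succ_iff_lt_or_eq.mp hlt with h' | h'
      · exact Or.inr ⟨⟨hpp, hpd, hn0⟩, hp3, h'⟩
      · exact Or.inl h'
    · rintro (rfl | ⟨⟨hpp, hpd, hn0⟩, hp3, hlt⟩)
      · exact ⟨⟨hb, hd, by omega⟩, h3, by omega⟩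
      · exact ⟨⟨hpp, hpd, hn0⟩, hp3, by omega⟩
  · unfold pvF
    simp only [Finset.mem_filter]
    rintro ⟨_, _, hlt⟩
    omega

theorem pvF_prod_dvd (n b : Nat) : (∏ p ∈ pvF n b, p) ∣ n := by
  by_cases hn : n = 0
  · subst hn; simp
  · calc (∏ p ∈ pvF n b, p) ∣ (∏ p ∈ n.primeFactors, p) :=
        Finset.prod_dvd_prod_of_subset _ _ _ (Finset.filter_subset _ _)
    _ ∣ n := Nat.prod_primeFactors_dvd n

theorem pvF_prod_pos (n b : Nat) : 0 < ∏ p ∈ pvF n b, p :=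
  Finset.prod_pos (fun p hp => (pvF_mem hp).1.pos)

theorem pvVal_nat_le {n b : Nat} (hne : pvF n b ≠ ∅) :
    (n / ∏ p ∈ pvF n b, p) * (∏ p ∈ pvF n b, (p - 1)) + 3 ≤ n := by
  obtain ⟨p₀, hp₀⟩ := Finset.nonempty_iff_ne_empty.mpr hne
  obtain ⟨hp₀p, hp₀d, hp₀3, _⟩ := pvF_mem hp₀
  set F := pvF n b with hF
  set P := ∏ p ∈ F, p with hP
  have hPd : P ∣ n := pvF_prod_dvd n b
  have hPpos : 0 < P := pvF_prod_pos n b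
  obtain ⟨s, hs⟩ := hPd
  have hsn : n / P = s := by rw [hs]; exact Nat.mul_div_cancel_left s hPpos
  have hQ : (∏ p ∈ F, (p - 1)) = (p₀ - 1) * ∏ p ∈ F.erase p₀, (p - 1) :=
    Finset.mul_prod_erase F _ hp₀ |>.symm
  have hPe : P = p₀ * ∏ p ∈ F.erase p₀, p := (Finset.mul_prod_erase F _ hp₀).symm
  have hQP : (∏ p ∈ F.erase p₀, (p - 1)) ≤ ∏ p ∈ F.erase p₀, p :=
    Finset.prod_le_prod' (fun p _ => Nat.sub_le p 1)
  have hk : n = p₀ * (s * ∏ p ∈ F.erase p₀, p) := by rw [hs, hPe]; ring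
  set k := s * ∏ p ∈ F.erase p₀, p with hkdef
  have hk3 : 3 ≤ k := by
    have h1 : p₀ * 3 ≤ p₀ * k := by rw [hk] at hp₀3; omega
    exact Nat.le_of_mul_le_mul_left h1 hp₀p.pos
  calc n / P * (∏ p ∈ F, (p - 1)) + 3
      = s * ((p₀ - 1) * ∏ p ∈ F.erase p₀, (p - 1)) + 3 := by rw [hsn, hQ]
    _ ≤ s * ((p₀ - 1) * ∏ p ∈ F.erase p₀, p) + 3 := by
        have := Nat.mul_le_mul_left (p₀ - 1) hQP
        have := Nat.mul_le_mul_left s this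
        omega
    _ = (p₀ - 1) * k + 3 := by rw [hkdef]; ring
    _ = p₀ * k - k + 3 := by rw [Nat.sub_mul, one_mul]
    _ ≤ n := by rw [hk]; have : k ≤ p₀ * k := Nat.le_mul_of_pos_left _ hp₀p.pos; omega

theorem pvVal_le {n b : Nat} (hn : n % 2 = 1) (hne : pvF n b ≠ ∅) :
    pvVal n b + 3 ≤ (n : Int) := by
  have hn1 : n ≠ 1 := by
    rintro rfl
    exact hne (by simp [pvF])
  unfold pvVal
  rw [if_neg (by omega), if_neg hn1, if_neg hne]
  have := pvVal_nat_le (n := n) (b := b) hne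
  exact_mod_cast this

theorem pvCofactor3 {n p : Nat} (hn : n % 2 = 1) (hnp : ¬ n.Prime) (hpp : p.Prime) (hpd : p ∣ n) :
    3 * p ≤ n := by
  obtain ⟨m, hm⟩ := hpd
  have hm1 : m ≠ 1 := by rintro rfl; rw [mul_one] at hm; exact hnp (hm ▸ hpp)
  have hm0 : m ≠ 0 := by rintro rfl; simp [hm] at hn
  have hmodd : m % 2 = 1 := by
    by_contra h
    have h2 : (2 : Nat) ∣ m := Nat.dvd_of_mod_eq_zero (by omega)
    have h3 : (2 : Nat) ∣ n := hm ▸ Dvd.dvd.mul_left h2 p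
    omega
  have h1 : p * 3 ≤ p * m := Nat.mul_le_mul_left p (by omega)
  rw [hm]
  omega

theorem pvVal_self_prime {i : Nat} (hiodd : i % 2 = 1) (h3 : 3 ≤ i) :
    (pvVal i i = (i : Int) - 1 ↔ i.Prime) := by
  constructor
  · intro hv
    by_contra hnp
    have hne : pvF i i ≠ ∅ := by
      have hmf : i.minFac.Prime := Nat.minFac_prime (by omega)
      have hmd : i.minFac ∣ i := Nat.minFac_dvd i
      have h3p : 3 * i.minFac ≤ i := pvCofactor3 hiodd hnp hmf hmd
      have hlt : i.minFac < i := by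
        rcases Nat.lt_or_ge i.minFac i with h | h
        · exact h
        · exfalso
          have : i.minFac ≤ i := Nat.le_of_dvd (by omega) hmd
          have : i.minFac = i := by omega
          exact hnp (this ▸ hmf)
      intro hemp
      have : i.minFac ∈ pvF i i := by
        unfold pvF
        exact Finset.mem_filter.mpr ⟨Nat.mem_primeFactors.mpr ⟨hmf, hmd, by omega⟩, h3p, hlt⟩
      simp [hemp] at this
    have := pvVal_le hiodd hne
    omega
  · intro hp
    have he : pvF i i = ∅ := by
      unfold pvF
      apply Finset.filter_eq_empty_iff.mpr
      intro p hpm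
      rcases Nat.mem_primeFactors.mp hpm with ⟨hpp, hpd, _⟩
      have : p = i := (Nat.prime_dvd_prime_iff_eq hpp hp).mp hpd
      subst this
      simp only [not_and]
      intro h
      omega
    unfold pvVal
    rw [if_neg (by omega), if_neg (by omega), if_pos he]

theorem pvVal_update {n i : Nat} (hn : n % 2 = 1) (hi : i.Prime) (hd : i ∣ n) (h3 : 3 * i ≤ n) :
    PySem.Int.floordiv
      ((if pvVal n i = (n : Int) - 1 then (n : Int) else pvVal n i) * ((i : Int) - 1)) i
      = pvVal n (i + 1) := by
  have hi2 := hi.two_le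
  have hn0 : 0 < n := by omega
  have hn1 : n ≠ 1 := by omega
  obtain ⟨hins, hnotmem⟩ := pvF_succ_mem hn0 hi hd h3
  set F := pvF n i with hF
  set P := ∏ p ∈ F, p with hP
  set Q := ∏ p ∈ F, (p - 1) with hQ
  have hPd : P ∣ n := pvF_prod_dvd n i
  have hPpos : 0 < P := pvF_prod_pos n i
  obtain ⟨s, hs⟩ := hPd
  have hsn : n / P = s := Nat.div_eq_of_eq_mul_right hPpos hs
  have hiP : ¬ i ∣ P := by
    intro hdvd
    obtain ⟨p, hpF, hip⟩ := (Prime.dvd_finset_prod_iff hi.prime _).mp hdvd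
    have hmem := pvF_mem (hF ▸ hpF)
    have : i = p := (Nat.prime_dvd_prime_iff_eq hi hmem.1).mp hip
    omega
  have his : i ∣ s := Nat.Coprime.dvd_of_dvd_mul_left
    ((Nat.Prime.coprime_iff_not_dvd hi).mpr hiP) (by rw [← hs]; exact hd)
  obtain ⟨u, hu⟩ := his
  have hval : (if pvVal n i = (n : Int) - 1 then (n : Int) else pvVal n i) = ((s * Q : Nat) : Int) := by
    by_cases hemp : F = ∅
    · have hP1 : P = 1 := by rw [hP, hemp]; simp
      have hQ1 : Q = 1 := by rw [hQ, hemp]; simp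
      have hsn' : s = n := by rw [hs, hP1, one_mul]
      have hv : pvVal n i = (n : Int) - 1 := by
        unfold pvVal
        rw [if_neg (by omega), if_neg hn1, if_pos (hF ▸ hemp)]
      rw [if_pos hv, hsn', hQ1, mul_one]
    · have hle := pvVal_le hn (hF ▸ hemp)
      have hv : pvVal n i = ((s * Q : Nat) : Int) := by
        unfold pvVal
        rw [if_neg (by omega), if_neg hn1, if_neg (hF ▸ hemp)]
        rw [← hF, ← hP, ← hQ, hsn]
      rw [if_neg (by rw [hv] at hle ⊢; intro heq; omega), hv]
  rw [hval]
  have hc : ((s * Q : Nat) : Int) * ((i : Int) - 1) = ((s * Q * (i - 1) : Nat) : Int) := by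
    push_cast [Nat.cast_sub (show 1 ≤ i by omega)]
    ring
  rw [hc, PySem.Int.floordiv_natCast]
  have hne' : pvF n (i + 1) ≠ ∅ := by
    rw [hins]
    exact (Finset.insert_nonempty _ _).ne_empty
  have hrhs : pvVal n (i + 1) = ((u * ((i - 1) * Q) : Nat) : Int) := by
    unfold pvVal
    rw [if_neg (by omega), if_neg hn1, if_neg hne', hins]
    rw [Finset.prod_insert hnotmem, Finset.prod_insert hnotmem]
    rw [← hP, ← hQ]
    have hdiv : n / (i * P) = u := by
      apply Nat.div_eq_of_eq_mul_right (by positivity)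
      rw [hs, hu]; ring
    rw [hdiv]
  rw [hrhs]
  congr 1
  rw [hu, show i * u * Q * (i - 1) = i * (u * (Q * (i - 1))) by ring,
     Nat.mul_div_cancel_left _ (by omega : 0 < i)]
  ring

theorem pvVal_target {n b : Nat} (h : ∀ p, p.Prime → p ∣ n → 3 * p ≤ n → p < b) :
    pvVal n b = pvTarget n := by
  unfold pvVal pvTarget
  by_cases he : n % 2 = 0
  · rw [if_pos he, if_neg (by omega)]
  · by_cases h1 : n = 1
    · subst h1; simp
    · rw [if_neg he, if_neg h1, if_pos (show n % 2 = 1 by omega)]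
      by_cases hp : n.Prime
      · have he2 : pvF n b = ∅ := by
          unfold pvF
          apply Finset.filter_eq_empty_iff.mpr
          intro p hpm
          rcases Nat.mem_primeFactors.mp hpm with ⟨hpp, hpd, _⟩
          have : p = n := (Nat.prime_dvd_prime_iff_eq hpp hp).mp hpd
          subst this
          simp only [not_and]
          intro h3
          have := hp.two_le
          omega
        rw [if_pos he2, Nat.totient_prime hp]
        have := hp.two_le
        push_cast [Nat.cast_sub (by omega : 1 ≤ n)]
        ring
      · have hFall : pvF n b = n.primeFactors := by
          unfold pvF
          apply Finset.filter_true_of_mem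
          intro p hpm
          rcases Nat.mem_primeFactors.mp hpm with ⟨hpp, hpd, _⟩
          have h3 := pvCofactor3 (by omega) hp hpp hpd
          exact ⟨h3, h p hpp hpd h3⟩
        by_cases hemp : pvF n b = ∅
        · exfalso
          rw [hFall] at hemp
          have : n = 1 := by
            rcases Nat.primeFactors_eq_empty.mp hemp with h0 | h1'
            · omega
            · exact h1'
          exact h1 this
        · rw [if_neg hemp, hFall]
          have key := Nat.totient_mul_prod_primeFactors n
          have hrad : (∏ p ∈ n.primeFactors, p) ∣ n := Nat.prod_primeFactors_dvd n
          obtain ⟨s, hs⟩ := hrad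
          have hradpos : 0 < ∏ p ∈ n.primeFactors, p :=
            Finset.prod_pos (fun p hp' => (Nat.prime_of_mem_primeFactors hp').pos)
          have hdiv : n / (∏ p ∈ n.primeFactors, p) = s :=
            Nat.div_eq_of_eq_mul_right hradpos hs
          have : n.totient = s * ∏ p ∈ n.primeFactors, (p - 1) := by
            have h2 : n.totient * (∏ p ∈ n.primeFactors, p)
                = (s * ∏ p ∈ n.primeFactors, (p - 1)) * (∏ p ∈ n.primeFactors, p) := by
              rw [key]
              calc n * ∏ p ∈ n.primeFactors, (p - 1)
                  = ((∏ p ∈ n.primeFactors, p) * s) * ∏ p ∈ n.primeFactors, (p - 1) := by rw [← hs]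
                _ = (s * ∏ p ∈ n.primeFactors, (p - 1)) * (∏ p ∈ n.primeFactors, p) := by ring
            exact Nat.eq_of_mul_eq_mul_right hradpos h2
          rw [hdiv, this]

-- ---- A's loops against the model ----
def pvMid (i j n : Nat) : Int := if i ∣ n ∧ 3 * i ≤ n ∧ n / i < j then pvVal n (i + 1) else pvVal n i

theorem pvVal_congr {n b b' : Nat} (h : pvF n b = pvF n b') : pvVal n b = pvVal n b' := by
  unfold pvVal
  rw [h]

theorem pvVal_even {n b : Nat} (h : n % 2 = 0) : pvVal n b = (n : Int) - 1 := by
  unfold pvVal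
  rw [if_pos h]

-- i+1 is even and ≥ 4 whenever 3 ≤ i, so it contributes nothing to pvF
theorem pvF_succ_even {n b : Nat} (h3 : 2 < b) (he : b % 2 = 0) :
    pvF n (b + 1) = pvF n b := by
  apply pvF_succ_not
  rintro ⟨hp, -, -⟩
  rcases hp.eq_one_or_self_of_dvd 2 (Nat.dvd_of_mod_eq_zero he) with h | h <;> omega

theorem pvInner_spec (limit i : Int) (hi : 0 < i) (j : Int) (arr : List Int)
    (hi3 : 3 ≤ i) (hiodd : i % 2 = 1) (hip : (i.toNat).Prime)
    (hj3 : 3 ≤ j) (hjodd : j % 2 = 1) (hil : 3 * i ≤ limit)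
    (harr : arr = (List.range (pvL limit)).map (pvMid i.toNat j.toNat)) :
    pvInnerA limit i hi j arr
      = (List.range (pvL limit)).map (fun n => pvVal n (i.toNat + 1)) := by
  revert hj3 hjodd harr
  induction j, arr using pvInnerA.induct limit i hi with
  | case1 j arr h arr1d arr2d ih =>
    intro hj3 hjodd harr
    rw [pvInnerA, dif_pos h]
    set I := i.toNat with hI
    set J := j.toNat with hJ
    have hiI : i = (I : Int) := by omega
    have hjJ : j = (J : Int) := by omega
    have hI3 : 3 ≤ I := by omega
    have hJ3 : 3 ≤ J := by omega
    have hIodd : I % 2 = 1 := by omega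
    have hJodd : J % 2 = 1 := by omega
    set n₀ := J * I with hn₀
    have hn₀odd : n₀ % 2 = 1 := by
      rw [hn₀, Nat.mul_mod, hIodd, hJodd]
    have hji : j * i = ((n₀ : Nat) : Int) := by rw [hiI, hjJ, hn₀]; push_cast; ring
    have hn₀L : n₀ < pvL limit := by
      have : ((n₀ : Nat) : Int) ≤ limit := by rw [← hji]; exact h
      unfold pvL
      omega
    have hdvd : I ∣ n₀ := by rw [hn₀]; exact dvd_mul_left I J
    have h3n : 3 * I ≤ n₀ := by
      calc 3 * I ≤ J * I := Nat.mul_le_mul_right I hJ3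
      _ = n₀ := rfl
    have hdivJ : n₀ / I = J := Nat.div_eq_of_eq_mul_right (by omega) (by rw [hn₀]; ring)
    -- the cell read picks up pvVal n₀ I (the counter has not yet passed j)
    have hread : PySem.List.pyGetD arr (j * i) 0 = pvVal n₀ I := by
      rw [harr, hji, PySem.List.pyGetD_natCast, PySem.List.getD_map_range _ _ _ _ hn₀L]
      unfold pvMid
      rw [if_neg (by rw [hdivJ]; omega)]
    -- the written cell value
    have harr2 :
        (PySem.List.pySetD
          (if PySem.List.pyGetD arr (j * i) 0 = j * i - 1
            then PySem.List.pySetD arr (j * i) (j * i) else arr) (j * i)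
          (PySem.Int.floordiv
            (PySem.List.pyGetD
              (if PySem.List.pyGetD arr (j * i) 0 = j * i - 1
                then PySem.List.pySetD arr (j * i) (j * i) else arr) (j * i) 0 * (i - 1)) i))
        = (List.range (pvL limit)).map (pvMid I (J + 2)) := by
      have harr1 :
          (if PySem.List.pyGetD arr (j * i) 0 = j * i - 1
            then PySem.List.pySetD arr (j * i) (j * i) else arr)
          = (List.range (pvL limit)).map
              (fun n => if n = n₀ then (if pvVal n₀ I = (n₀ : Int) - 1 then (n₀ : Int) else pvVal n₀ I)
                        else pvMid I J n) := by
        rw [hread]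
        by_cases hc : pvVal n₀ I = ((n₀ : Nat) : Int) - 1
        · rw [if_pos (by rw [hji]; exact_mod_cast hc), if_pos hc]
          rw [harr, hji, PySem.List.pySetD_natCast, pvSet_map_range hn₀L]
        · rw [if_neg (by rw [hji]; exact_mod_cast hc), if_neg hc]
          rw [harr]
          apply List.map_congr_left
          intro n hn
          by_cases hne : n = n₀
          · subst hne
            rw [if_pos rfl]
            unfold pvMid
            rw [if_neg (by rw [hdivJ]; omega)]
          · rw [if_neg hne]
      rw [harr1]
      have hread1 : PySem.List.pyGetD
          ((List.range (pvL limit)).map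
            (fun n => if n = n₀ then (if pvVal n₀ I = (n₀ : Int) - 1 then (n₀ : Int) else pvVal n₀ I)
                      else pvMid I J n)) (j * i) 0
          = (if pvVal n₀ I = (n₀ : Int) - 1 then (n₀ : Int) else pvVal n₀ I) := by
        rw [hji, PySem.List.pyGetD_natCast, PySem.List.getD_map_range _ _ _ _ hn₀L, if_pos rfl]
      rw [hread1, hji, PySem.List.pySetD_natCast, pvSet_map_range hn₀L]
      apply List.map_congr_left
      intro n hn
      by_cases hne : n = n₀
      · subst hne
        rw [if_pos rfl]
        have hupd := pvVal_update hn₀odd hip hdvd h3n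
        rw [hiI]
        rw [show ((I : Int) - 1) = (((I : Nat) : Int) - 1) from rfl]
        rw [hupd]
        unfold pvMid
        rw [if_pos (show I ∣ n₀ ∧ 3 * I ≤ n₀ ∧ n₀ / I < J + 2 from ⟨hdvd, h3n, by rw [hdivJ]; omega⟩)]
      · rw [if_neg hne, if_neg hne]
        unfold pvMid
        by_cases hcnd : I ∣ n ∧ 3 * I ≤ n ∧ n / I < J
        · rw [if_pos hcnd, if_pos (show I ∣ n ∧ 3 * I ≤ n ∧ n / I < J + 2 from ⟨hcnd.1, hcnd.2.1, by omega⟩)]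
        · by_cases hcnd2 : I ∣ n ∧ 3 * I ≤ n ∧ n / I < J + 2
          · -- n / I ∈ {J, J+1}; n = J*I is excluded, so n = (J+1)*I which is even
            obtain ⟨hd2, h32, hlt2⟩ := hcnd2
            have hge : ¬ (n / I < J) := fun hlt => hcnd ⟨hd2, h32, hlt⟩
            rw [if_neg hcnd, if_pos (show I ∣ n ∧ 3 * I ≤ n ∧ n / I < J + 2 from ⟨hd2, h32, hlt2⟩)]
            obtain ⟨c, hc⟩ := hd2
            have hdivc : n / I = c := Nat.div_eq_of_eq_mul_right (by omega) hc
            have hcJ : c = J ∨ c = J + 1 := by omega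
            rcases hcJ with rfl | rfl
            · exact absurd (by rw [hc, hn₀]; ring) hne
            · have hIJ : (I * J) % 2 = 1 := by rw [Nat.mul_mod, hIodd, hJodd]
              have heven : n % 2 = 0 := by
                have hn' : n = I * J + I := by rw [hc]; ring
                omega
              rw [pvVal_even heven, pvVal_even heven]
          · rw [if_neg hcnd, if_neg hcnd2]
    exact ih (by omega) (by omega)
      (by rw [show (j + 2).toNat = J + 2 by omega]; exact harr2)
  | case2 j arr h =>
    intro hj3 hjodd harr
    rw [pvInnerA, dif_neg h]
    rw [harr]
    apply List.map_congr_left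
    intro n hn
    have hnL : n < pvL limit := List.mem_range.mp hn
    have hnlim : ((n : Nat) : Int) ≤ limit := by unfold pvL at hnL; omega
    unfold pvMid
    by_cases hcnd : i.toNat ∣ n ∧ 3 * i.toNat ≤ n
    · have hji : ((j.toNat * i.toNat : Nat) : Int) = j * i := by
        push_cast
        rw [Int.toNat_of_nonneg (by omega), Int.toNat_of_nonneg (by omega)]
      have hnlt : n < j.toNat * i.toNat := by
        have h2 : ((n : Nat) : Int) < j * i := by omega
        rw [← hji] at h2
        exact_mod_cast h2
      have hdivlt : n / i.toNat < j.toNat := Nat.div_lt_of_lt_mul (by rw [Nat.mul_comm]; exact hnlt)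
      rw [if_pos (show i.toNat ∣ n ∧ 3 * i.toNat ≤ n ∧ n / i.toNat < j.toNat from ⟨hcnd.1, hcnd.2, hdivlt⟩)]
    · rw [if_neg (by tauto)]
      apply pvVal_congr
      apply (pvF_succ_not ?_).symm
      rintro ⟨-, hd, h3⟩
      exact hcnd ⟨hd, by omega⟩

theorem pvOuter_spec (limit i : Int) (hi : 0 < i) (arr : List Int)
    (hi3 : 3 ≤ i) (hiodd : i % 2 = 1)
    (harr : arr = (List.range (pvL limit)).map (fun n => pvVal n i.toNat)) :
    pvOuterA limit i hi arr = (List.range (pvL limit)).map pvTarget := by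
  revert hi3 hiodd harr
  induction i, hi, arr using pvOuterA.induct limit with
  | case1 i hi arr h arrd ih =>
    intro hi3 hiodd harr
    rw [pvOuterA, dif_pos h]
    set I := i.toNat with hI
    have hiI : i = (I : Int) := by omega
    have hI3 : 3 ≤ I := by omega
    have hIodd : I % 2 = 1 := by omega
    have hIL : I < pvL limit := by unfold pvL; omega
    have hread : PySem.List.pyGetD arr i 0 = pvVal I I := by
      rw [harr, hiI, PySem.List.pyGetD_natCast, PySem.List.getD_map_range _ _ _ _ hIL]
    have hi1 : i - 1 = ((I : Int)) - 1 := by omega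
    -- pvF is unchanged passing an even number ≥ 4 (I + 1) and, when I is composite, I itself
    have hskip_even : ∀ n : Nat, pvVal n (I + 2) = pvVal n (I + 1) := fun n =>
      pvVal_congr (pvF_succ_even (by omega) (by omega))
    have hstep : (if PySem.List.pyGetD arr i 0 = i - 1 then pvInnerA limit i hi 3 arr else arr)
        = (List.range (pvL limit)).map (fun n => pvVal n (i + 2).toNat) := by
      have ht2 : (i + 2).toNat = I + 2 := by omega
      rw [ht2]
      by_cases hp : Nat.Prime I
      · rw [if_pos (by rw [hread, hi1]; exact_mod_cast (pvVal_self_prime hIodd hI3).mpr hp)]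
        have harr3 : arr = (List.range (pvL limit)).map (pvMid I 3) := by
          rw [harr]
          apply List.map_congr_left
          intro n hn
          unfold pvMid
          by_cases hc : I ∣ n ∧ 3 * I ≤ n ∧ n / I < 3
          · exfalso
            obtain ⟨hd, h3, hlt⟩ := hc
            have : 3 ≤ n / I := (Nat.le_div_iff_mul_le (by omega)).mpr (by omega)
            omega
          · rw [if_neg hc]
        have hinner := pvInner_spec limit i hi 3 arr hi3 hiodd hp (by norm_num) (by norm_num) h
          (by rw [harr3, show (3 : Int).toNat = 3 from rfl])
        rw [hinner]
        apply List.map_congr_left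
        intro n hn
        exact (hskip_even n).symm
      · rw [if_neg (by rw [hread, hi1]; exact_mod_cast fun hc => hp ((pvVal_self_prime hIodd hI3).mp (by exact_mod_cast hc)))]
        rw [harr]
        apply List.map_congr_left
        intro n hn
        have h1 : pvVal n (I + 1) = pvVal n I :=
          pvVal_congr (pvF_succ_not (fun hcon => hp hcon.1))
        rw [hskip_even n, h1]
    exact ih (by omega) (by omega) (by rw [← hstep]; exact rfl)
  | case2 i hi arr h =>
    intro hi3 hiodd harr
    rw [pvOuterA, dif_neg h]
    rw [harr]
    apply List.map_congr_left
    intro n hn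
    have hnL : n < pvL limit := List.mem_range.mp hn
    have hnlim : ((n : Nat) : Int) ≤ limit := by unfold pvL at hnL; omega
    apply pvVal_target
    intro p hpp hpd h3p
    -- 3p ≤ n ≤ limit < 3i  ⇒  p < i
    have : ((3 * p : Nat) : Int) < 3 * i := by push_cast; omega
    omega

-- ---- B's phi against Nat.totient ----
theorem pvStrip_spec (m d t : Nat) (hm : 0 < m) (hd : 2 ≤ d) :
    ∃ k m', pvStrip m d t = (m', t * d ^ k) ∧ m = d ^ k * m' ∧ ¬ d ∣ m' ∧ 0 < m' := by
  induction m using Nat.strong_induction_on generalizing t with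
  | _ m ih =>
    rw [pvStrip]
    by_cases hdvd : m % d = 0
    · rw [dif_pos ⟨hdvd, hm, hd⟩]
      have hdm : d ∣ m := Nat.dvd_of_mod_eq_zero hdvd
      have hlt : m / d < m := Nat.div_lt_self hm (by omega)
      have hpos : 0 < m / d := Nat.div_pos (Nat.le_of_dvd hm hdm) (by omega)
      obtain ⟨k, m', he, hfac, hnd, hpos'⟩ := ih (m / d) hlt (t * d) hpos
      refine ⟨k + 1, m', ?_, ?_, hnd, hpos'⟩
      · rw [he]
        congr 1
        ring
      · rw [pow_succ]
        calc m = d * (m / d) := (Nat.mul_div_cancel' hdm).symm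
        _ = d * (d ^ k * m') := by rw [← hfac]
        _ = d ^ k * d * m' := by ring
    · rw [dif_neg (by simp [hdvd])]
      exact ⟨0, m, by simp, by simp, fun hc => hdvd (Nat.mod_eq_zero_of_dvd hc), hm⟩

theorem pvPhiLoop_totient (m d t : Nat) (hm : 0 < m) (hmodd : m % 2 = 1)
    (hdodd : d % 2 = 1) (hd3 : 3 ≤ d) (hmin : ∀ p, p.Prime → p ∣ m → d ≤ p) :
    pvPhiLoop m d t = t * m.totient := by
  induction m, d, t using pvPhiLoop.induct with
  | case1 m d t hdd hdvd ih =>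
    rw [pvPhiLoop, dif_pos hdd, if_pos hdvd]
    have hdm : d ∣ m := Nat.dvd_of_mod_eq_zero hdvd
    have hdp : d.Prime := by
      by_contra hnp
      have hmf : d.minFac.Prime := Nat.minFac_prime (by omega)
      have h1 : d ≤ d.minFac := hmin _ hmf ((Nat.minFac_dvd d).trans hdm)
      have h2 : d.minFac ≤ d := Nat.le_of_dvd (by omega) (Nat.minFac_dvd d)
      exact hnp ((by omega : d.minFac = d) ▸ hmf)
    have hpos : 0 < m / d := Nat.div_pos (Nat.le_of_dvd hm hdm) (by omega)
    obtain ⟨k, m', he, hfac, hnd, hpos'⟩ := pvStrip_spec (m / d) d (t * (d - 1)) hpos (by omega)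
    rw [he] at ih ⊢
    dsimp only at ih ⊢
    have hmfac : m = d ^ (k + 1) * m' := by
      rw [pow_succ]
      calc m = d * (m / d) := (Nat.mul_div_cancel' hdm).symm
      _ = d * (d ^ k * m') := by rw [← hfac]
      _ = d ^ k * d * m' := by ring
    have hm'odd : m' % 2 = 1 := by
      by_contra h
      have h2 : (2 : Nat) ∣ m' := Nat.dvd_of_mod_eq_zero (by omega)
      have : (2 : Nat) ∣ m := hmfac ▸ Dvd.dvd.mul_left h2 _
      omega
    have hm'min : ∀ p, p.Prime → p ∣ m' → d + 2 ≤ p := by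
      intro p hp hpd
      have hpm : p ∣ m := hmfac ▸ hpd.mul_left _
      have h1 := hmin p hp hpm
      have h2 : p ≠ d := by rintro rfl; exact hnd hpd
      have h3 : p % 2 = 1 := by
        by_contra h
        have h2' : (2 : Nat) ∣ p := Nat.dvd_of_mod_eq_zero (by omega)
        have : (2 : Nat) ∣ m := h2'.trans hpm
        omega
      omega
    rw [ih hpos' hm'odd (by omega) (by omega) hm'min]
    have hco : Nat.Coprime (d ^ (k + 1)) m' :=
      Nat.Coprime.pow_left _ ((Nat.Prime.coprime_iff_not_dvd hdp).mpr hnd)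
    have htot : m.totient = d ^ k * (d - 1) * m'.totient := by
      rw [hmfac, Nat.totient_mul hco, Nat.totient_prime_pow hdp (by omega)]
      simp
    rw [htot]
    ring
  | case2 m d t hdd hdvd ih =>
    rw [pvPhiLoop, dif_pos hdd, if_neg hdvd]
    have hmin' : ∀ p, p.Prime → p ∣ m → d + 2 ≤ p := by
      intro p hp hpd
      have h1 := hmin p hp hpd
      have h2 : p ≠ d := by rintro rfl; exact hdvd (Nat.mod_eq_zero_of_dvd hpd)
      have h3 : p % 2 = 1 := pvOdd_factor hmodd hp hpd
      omega
    exact ih hm hmodd (by omega) (by omega) hmin'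
  | case3 m d t hdd h1 =>
    rw [pvPhiLoop, dif_neg hdd, if_pos h1]
    have hp : m.Prime := by
      by_contra hnp
      have hmf : m.minFac.Prime := Nat.minFac_prime (by omega)
      have hsq : m.minFac ^ 2 ≤ m := Nat.minFac_sq_le_self (by omega) hnp
      have hge := hmin _ hmf (Nat.minFac_dvd m)
      have : d * d ≤ m := le_trans (by nlinarith) hsq
      omega
    rw [Nat.totient_prime hp]
  | case4 m d t hdd h1 =>
    rw [pvPhiLoop, dif_neg hdd, if_neg h1]
    have : m = 1 := by omega
    subst this
    simp

-- ---- assembly ----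
theorem pvAlt_eq (limit : Int) (hl : 0 ≤ limit) :
    oddTotientSieve_alt limit = (List.range (pvL limit)).map pvTarget := by
  unfold oddTotientSieve_alt
  have hcast : limit + 1 = ((pvL limit : Nat) : Int) := by unfold pvL; omega
  rw [hcast, PySem.List.pyRange_zero_nat, List.map_map]
  apply List.map_congr_left
  intro n hn
  simp only [Function.comp]
  rw [PySem.Int.mod_eq_emod_of_pos (by norm_num)]
  unfold pvTarget
  by_cases he : n % 2 = 1
  · rw [if_pos (by omega : ¬ ((n : Int) % 2 = 0)), if_pos he]
    rw [Int.toNat_natCast]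
    rw [pvPhiLoop_totient n 3 1 (by omega) he (by norm_num) (by norm_num) ?_]
    · rw [one_mul]
    · intro p hp hpd
      have := hp.two_le
      have := pvOdd_factor he hp hpd
      omega
  · rw [if_neg (by simp only [ne_eq, not_not]; omega), if_neg he]

theorem pvInit_eq (limit : Int) (hl : 1 ≤ limit) :
    PySem.List.pySetD ((PySem.List.pyRange 0 (limit + 1) 1).map (fun i => i - 1)) 1 1
      = (List.range (pvL limit)).map (fun n => pvVal n 3) := by
  have hcast : limit + 1 = ((pvL limit : Nat) : Int) := by unfold pvL; omega
  rw [hcast, PySem.List.pyRange_zero_nat, List.map_map]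
  rw [PySem.List.pySetD_of_nonneg _ _ (by norm_num : (0 : Int) ≤ 1)]
  simp only [Int.toNat_one]
  have hL : 1 < pvL limit := by unfold pvL; omega
  rw [pvSet_map_range hL]
  apply List.map_congr_left
  intro n hn
  simp only [Function.comp]
  by_cases h1 : n = 1
  · subst h1
    simp [pvVal]
  · rw [if_neg h1]
    unfold pvVal
    by_cases he : n % 2 = 0
    · rw [if_pos he]
    · rw [if_neg he, if_neg h1, if_pos ?_]
      unfold pvF
      apply Finset.filter_eq_empty_iff.mpr
      intro p hpm
      rcases Nat.mem_primeFactors.mp hpm with ⟨hpp, hpd, _⟩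
      have hpo : p % 2 = 1 := pvOdd_factor (by omega) hpp hpd
      have := hpp.two_le
      simp only [not_and]
      intro
      omega

-- ===== VERDICT (by name: the statement is the Claim_ definition above) =====
theorem oddTotientSieve_spec : Claim_equal_oddTotientSieve := by
  intro limit _ hpre
  have hl : (1 : Int) ≤ limit := hpre
  unfold Spec_oddTotientSieve
  show oddTotientSieve limit = oddTotientSieve_alt limit
  show pvOuterA limit 3 (by norm_num)
      (PySem.List.pySetD ((PySem.List.pyRange 0 (limit + 1) 1).map (fun i => i - 1)) 1 1)
      = oddTotientSieve_alt limit
  rw [pvInit_eq limit hl, pvAlt_eq limit (by omega)]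
  exact pvOuter_spec limit 3 (by norm_num) _ (by norm_num) (by norm_num) rfl
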